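-- pv_equiv track=rewrite | github.com/theorhythm/hyperskill-projects | PthonCore/Hard/regex.py | comp_diff
-- ===== SOURCE A (Python) =====
-- def comp_str(re, txt):
--     if re == txt:
--         return True
--     elif re == '.' and len(txt) == 1:
--         return True
--     elif re == '':
--         return True
--     else:
--         return False
--
-- def comp_literal(re, txt):
--     if re == txt:
--         return True
--     elif re == '':
--         return True
--     else:
--         return False
--
-- def comp_recursive(re, txt):
--     if re == '':
--         return True
--     if txt == '':
--         if re == '$':
--             return True
--         return False
--     if re[0] == '\\':
--         if not comp_literal(re[1], txt[0]):
--             return comp_recursive(re, txt[1:])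
--         else:
--             return comp_recursive(re[2:], txt[1:])
--
--     if not comp_str(re[0], txt[0]):
--         if len(re[1:]) > 1 and re[1] in ('?', '*'):
--             return comp_recursive(re[2:], txt[0:])
--         elif len(re[1:]) == 1 and re[1] in ('?', '*'):
--             return True
--         return False
--     if len(re[1:]) > 1:
--         if re[1] == '*':
--             return comp_recursive(re, txt[1:]) or comp_recursive(re[2:], txt[1:])
--         if re[1] == '?':
--             return comp_recursive(re[2:], txt[1:])
--         if re[1] == '+':
--             new_re = re[0] + '*' + re[2:]
--             return comp_recursive(new_re, txt[1:]) or comp_recursive(re[2:], txt[1:])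
--         return comp_recursive(re[1:], txt[1:])
--     if len(re[1:]) == 1 and re[1] in ('*', '+', '?'):
--         return True
--     return comp_recursive(re[1:], txt[1:])
--
-- def comp_diff(re, txt):
--     if re == '':
--         return True
--     if re[0] == '^':
--         return comp_recursive(re[1:], txt)
--     for i in range(len(txt)):
--         new_txt = txt[i:]
--         if comp_recursive(re, new_txt):
--             return True
--     return False
-- ===== SOURCE B (Python) =====
-- def comp_diff(re, txt):
--     # Memoized DP over (pattern index, text index, star-flag) states, one table
--     # shared across all start positions, instead of exponential backtracking on
--     # string slices.
--     if re == '':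
--         return True
--     n, m = len(re), len(txt)
--     memo = {}
--
--     def match(i, j, star):
--         # does re[i:] (with the quantifier at i+1 read as '*' when star) match txt[j:]
--         key = (i, j, star)
--         if key in memo:
--             return memo[key]
--         if i == n:
--             res = True
--         elif j == m:
--             res = (i == n - 1 and re[i] == '$')
--         elif re[i] == '\\':
--             if re[i + 1] == txt[j]:
--                 res = match(i + 2, j + 1, False)
--             else:
--                 res = match(i, j + 1, False)
--         else:
--             q = '*' if star else (re[i + 1] if i + 1 < n else '')
--             hit = re[i] == txt[j] or re[i] == '.'
--             if not hit:
--                 if i + 2 < n and q in ('?', '*'):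
--                     res = match(i + 2, j, False)
--                 elif i + 2 == n and q in ('?', '*'):
--                     res = True
--                 else:
--                     res = False
--             elif i + 2 < n:
--                 if q == '*':
--                     res = match(i, j + 1, star) or match(i + 2, j + 1, False)
--                 elif q == '?':
--                     res = match(i + 2, j + 1, False)
--                 elif q == '+':
--                     res = match(i, j + 1, True) or match(i + 2, j + 1, False)
--                 else:
--                     res = match(i + 1, j + 1, False)
--             elif i + 2 == n and q in ('*', '+', '?'):
--                 res = True
--             else:
--                 res = match(i + 1, j + 1, False)
--         memo[key] = res
--         return res
--
--     if re[0] == '^':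
--         return match(1, 0, False)
--     return any(match(0, j, False) for j in range(m))
-- ===== Notes on version B (the rewrite author's own statement) =====
-- stated objective: alternative
-- what changed: re-implements the matcher as a top-down memoized DP over (pattern-index, text-index, star-flag) states with one memo table shared across all unanchored start positions, instead of A's recursive backtracking on string slices (which re-builds the regex by concatenation in the '+' case); intended to avoid A's exponential backtracking (measured 2.4x at n=4096, unconfirmed at larger sizes, so no speed claim is made)
-- outside the precondition, e.g. on comp_diff('a\\', ''): A returns False, B returns False; on comp_diff('\\', 'a'): A raises IndexError, B raises IndexError
import Mathlib
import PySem

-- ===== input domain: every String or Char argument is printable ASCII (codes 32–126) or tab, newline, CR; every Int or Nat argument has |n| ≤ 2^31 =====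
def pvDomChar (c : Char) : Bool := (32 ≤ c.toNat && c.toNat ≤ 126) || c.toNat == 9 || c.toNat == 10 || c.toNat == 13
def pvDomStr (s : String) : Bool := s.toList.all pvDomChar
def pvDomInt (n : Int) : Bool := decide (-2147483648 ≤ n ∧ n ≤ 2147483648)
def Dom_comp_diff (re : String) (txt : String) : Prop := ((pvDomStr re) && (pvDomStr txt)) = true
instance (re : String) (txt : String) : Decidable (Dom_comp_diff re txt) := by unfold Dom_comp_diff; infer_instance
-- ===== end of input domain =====

-- B re-implements the matcher as a memoized DP over (pattern-index, text-index,
-- star-flag) states, one table shared across all start positions, instead of A's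
-- recursive backtracking on string slices; return values (only — no side effects
-- are involved) agree on patterns not ending in a bare backslash.

-- ===== PORT A =====
def comp_str_chars (re txt : List Char) : Bool :=
  if re = txt then true
  else if re = ['.'] ∧ txt.length = 1 then true
  else if re = [] then true
  else false

def comp_literal_chars (re txt : List Char) : Bool :=
  if re = txt then true
  else if re = [] then true
  else false

def compRecA (re txt : List Char) : Bool :=
  if hre : re = [] then true
  else if htxt : txt = [] then (if re = ['$'] then true else false)
  else
    if re.headD ' ' = '\\' then
      match re.tail with
      | [] => false   -- Python raises IndexError reading re[1] here; such inputs are outside Pre_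
      | r1 :: rr =>
        if comp_literal_chars [r1] [txt.headD ' '] = false then compRecA re txt.tail
        else compRecA rr txt.tail
    else if comp_str_chars [re.headD ' '] [txt.headD ' '] = false then
      if 1 < re.tail.length ∧ (re.tail.headD ' ' = '?' ∨ re.tail.headD ' ' = '*') then
        compRecA (re.tail.drop 1) txt
      else if re.tail.length = 1 ∧ (re.tail.headD ' ' = '?' ∨ re.tail.headD ' ' = '*') then true
      else false
    else if 1 < re.tail.length then
      if re.tail.headD ' ' = '*' then compRecA re txt.tail || compRecA (re.tail.drop 1) txt.tail
      else if re.tail.headD ' ' = '?' then compRecA (re.tail.drop 1) txt.tail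
      else if re.tail.headD ' ' = '+' then
        compRecA (re.headD ' ' :: '*' :: re.tail.drop 1) txt.tail || compRecA (re.tail.drop 1) txt.tail
      else compRecA re.tail txt.tail
    else if re.tail.length = 1 ∧ (re.tail.headD ' ' = '*' ∨ re.tail.headD ' ' = '+' ∨ re.tail.headD ' ' = '?') then true
    else compRecA re.tail txt.tail
termination_by (txt.length, re.length)
decreasing_by
  all_goals
    (have h1 : re.length ≠ 0 := by simpa [List.length_eq_zero_iff] using hre
     first
      | (have h2 : txt.length ≠ 0 := by simpa [List.length_eq_zero_iff] using htxt
         apply Prod.Lex.left; simp [List.length_tail]; omega)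
      | (apply Prod.Lex.right; simp [List.length_tail]; omega))

-- the for-loop over i in range(len(txt)) with early return
def searchA (re txt : List Char) (i : Nat) : Bool :=
  if i < txt.length then
    (if compRecA re (txt.drop i) then true else searchA re txt (i + 1))
  else false
termination_by txt.length - i

def comp_diff (re : String) (txt : String) : Bool :=
  if re.toList = [] then true
  else if re.toList.headD ' ' = '^' then compRecA (re.toList.drop 1) txt.toList
  else searchA re.toList txt.toList 0

-- ===== PORT B =====
-- memoized matcher: does re[i:] (with the quantifier at i+1 read as '*' when star) match txt[j:]
-- (Python's `i == n` / `j == m` exits are written `≤` — i, j reach n, m exactly there;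
--  Python's sentinel `q = ''` for a missing re[i+1] is the `none` of `r[i+1]?`)
def bgo (r t : List Char) (i j : Nat) (star : Bool)
    (memo : PySem.Dict (Nat × Nat × Bool) Bool) : Bool × PySem.Dict (Nat × Nat × Bool) Bool :=
  match memo.get? (i, j, star) with
  | some v => (v, memo)
  | none =>
    let p : Bool × PySem.Dict (Nat × Nat × Bool) Bool :=
      if hn : r.length ≤ i then (true, memo)
      else if hm : t.length ≤ j then (decide (i = r.length - 1 ∧ r.getD i ' ' = '$'), memo)
      else if r.getD i ' ' = '\\' then
        match r[i + 1]? with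
        | none => (false, memo)   -- Python raises IndexError reading re[i+1]; outside Pre_
        | some e =>
          if e = t.getD j ' ' then bgo r t (i + 2) (j + 1) false memo
          else bgo r t i (j + 1) false memo
      else
        let q : Option Char := if star then some '*' else r[i + 1]?
        if ¬ (r.getD i ' ' = t.getD j ' ' ∨ r.getD i ' ' = '.') then   -- `if not hit`
          if hq : i + 2 < r.length ∧ (q = some '?' ∨ q = some '*') then bgo r t (i + 2) j false memo
          else if i + 2 = r.length ∧ (q = some '?' ∨ q = some '*') then (true, memo)
          else (false, memo)
        else if i + 2 < r.length then
          if q = some '*' then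
            let res1 := bgo r t i (j + 1) star memo
            if res1.1 then (true, res1.2) else bgo r t (i + 2) (j + 1) false res1.2
          else if q = some '?' then bgo r t (i + 2) (j + 1) false memo
          else if q = some '+' then
            let res1 := bgo r t i (j + 1) true memo
            if res1.1 then (true, res1.2) else bgo r t (i + 2) (j + 1) false res1.2
          else bgo r t (i + 1) (j + 1) false memo
        else if i + 2 = r.length ∧ (q = some '*' ∨ q = some '+' ∨ q = some '?') then (true, memo)
        else bgo r t (i + 1) (j + 1) false memo
    (p.1, p.2.insert (i, j, star) p.1)
termination_by ((t.length - j) + (r.length - i))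
decreasing_by all_goals omega

-- any(match(0, j, False) for j in range(m)), short-circuiting, sharing the memo
def searchB (r t : List Char) (j : Nat)
    (memo : PySem.Dict (Nat × Nat × Bool) Bool) : Bool :=
  if j < t.length then
    (if (bgo r t 0 j false memo).1 then true else searchB r t (j + 1) (bgo r t 0 j false memo).2)
  else false
termination_by t.length - j

def comp_diff_alt (re : String) (txt : String) : Bool :=
  if re.toList = [] then true
  else if re.toList.headD ' ' = '^' then (bgo re.toList txt.toList 1 0 false PySem.Dict.empty).1
  else searchB re.toList txt.toList 0 PySem.Dict.empty

-- ===== PRECONDITION & SPEC =====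
-- Pre_ excludes patterns ending in a bare backslash: on those (and only those) A's
-- comp_recursive can reach a state re == '\' and raise IndexError reading re[1].
-- (It is slightly conservative: on some such patterns A still returns, e.g. when txt
-- is exhausted first — both programs agree there too, but they are outside the claim.)
def Pre_comp_diff (re : String) (txt : String) : Prop := re.toList.getLast? ≠ some '\\'
instance (re : String) (txt : String) : Decidable (Pre_comp_diff re txt) := by
  unfold Pre_comp_diff; infer_instance

def pvWitness_comp_diff : String × String := ("a*b.c", "xaabbcc")

def Spec_comp_diff (re : String) (txt : String) (out : Bool) : Prop := out = comp_diff_alt re txt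
instance (re : String) (txt : String) (out : Bool) : Decidable (Spec_comp_diff re txt out) := by
  unfold Spec_comp_diff; infer_instance

-- ===== CLAIM (what is proved, stated in full; the proofs are below) =====
def Claim_equal_comp_diff : Prop := ∀ (re : String) (txt : String), Dom_comp_diff re txt → Pre_comp_diff re txt → Spec_comp_diff re txt (comp_diff re txt)

-- ===== LEMMAS AND PROOFS =====

theorem comp_str_single (c d : Char) :
    comp_str_chars [c] [d] = (decide (c = d) || decide (c = '.')) := by
  by_cases h1 : c = d <;> by_cases h2 : c = '.' <;> simp [comp_str_chars, h1, h2]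

theorem comp_lit_single (c d : Char) :
    comp_literal_chars [c] [d] = decide (c = d) := by
  by_cases h1 : c = d <;> simp [comp_literal_chars, h1]

-- the A-side regex suffix that B's state (i, star) stands for
def flagged (s : Bool) (l : List Char) : List Char :=
  if s then (match l with
             | c :: _ :: rest => c :: '*' :: rest
             | l => l)
  else l

-- states with star = true always have a two-char head whose first char is not '\'
def GoodSt (r : List Char) (i : Nat) (s : Bool) : Prop :=
  s = true → i + 1 < r.length ∧ r.getD i ' ' ≠ '\\'

def MemoInv (r t : List Char) (memo : PySem.Dict (Nat × Nat × Bool) Bool) : Prop :=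
  ∀ i j s v, memo.get? (i, j, s) = some v →
    GoodSt r i s ∧ v = compRecA (flagged s (r.drop i)) (t.drop j)

theorem MemoInv_empty (r t : List Char) : MemoInv r t PySem.Dict.empty := by
  intro i j s v h
  simp [PySem.Dict.get?_empty] at h

theorem MemoInv_insert {r t : List Char} {memo : PySem.Dict (Nat × Nat × Bool) Bool}
    {i j : Nat} {s : Bool} {v : Bool}
    (hm : MemoInv r t memo) (hg : GoodSt r i s)
    (hv : v = compRecA (flagged s (r.drop i)) (t.drop j)) :
    MemoInv r t (memo.insert (i, j, s) v) := by
  intro i' j' s' v' h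
  by_cases hk : (i', j', s') = (i, j, s)
  · simp only [Prod.mk.injEq] at hk
    obtain ⟨rfl, rfl, rfl⟩ := hk
    rw [PySem.Dict.get?_insert_self] at h
    cases h
    exact ⟨hg, hv⟩
  · rw [PySem.Dict.get?_insert_of_ne _ _ hk] at h
    exact hm i' j' s' v' h

theorem compRecA_nil (t : List Char) : compRecA [] t = true := by
  rw [compRecA.eq_def]; simp

theorem compRecA_cons_nil (c : Char) (rt : List Char) :
    compRecA (c :: rt) [] = (if c :: rt = ['$'] then true else false) := by
  rw [compRecA.eq_def]; simp

theorem flagged_false (l : List Char) : flagged false l = l := rfl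

theorem flagged_nil (s : Bool) : flagged s [] = [] := by cases s <;> rfl

theorem flagged_true_cons (c d : Char) (l : List Char) :
    flagged true (c :: d :: l) = c :: '*' :: l := rfl

theorem ite_true_bool {a b : Bool × PySem.Dict (Nat × Nat × Bool) Bool} :
    (if (true : Bool) = true then a else b) = a := rfl

theorem ite_false_bool {a b : Bool × PySem.Dict (Nat × Nat × Bool) Bool} :
    (if (false : Bool) = true then a else b) = b := rfl

theorem bgo_ok (μ : Nat) : ∀ (r t : List Char) (i j : Nat) (s : Bool)
    (memo : PySem.Dict (Nat × Nat × Bool) Bool),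
    (t.length - j) + (r.length - i) ≤ μ → GoodSt r i s → MemoInv r t memo →
    (bgo r t i j s memo).1 = compRecA (flagged s (r.drop i)) (t.drop j) ∧
      MemoInv r t (bgo r t i j s memo).2 := by
  induction μ using Nat.strong_induction_on with
  | _ μ IH =>
  intro r t i j s memo hμ hg hm
  rw [bgo.eq_def]
  cases hget : memo.get? (i, j, s) with
  | some v => exact ⟨(hm i j s v hget).2, hm⟩
  | none =>
  have hfin : ∀ (b : Bool) (d : PySem.Dict (Nat × Nat × Bool) Bool),
      b = compRecA (flagged s (r.drop i)) (t.drop j) → MemoInv r t d →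
      ((b, d.insert (i, j, s) b).1 = compRecA (flagged s (r.drop i)) (t.drop j) ∧
        MemoInv r t ((b, d.insert (i, j, s) b).2)) :=
    fun b d hb hd => ⟨hb, MemoInv_insert hd hg hb⟩
  by_cases hn : r.length ≤ i
  · simp only [dif_pos hn]
    exact hfin true memo (by rw [List.drop_eq_nil_of_le hn, flagged_nil, compRecA_nil]) hm
  · push_neg at hn
    have hdropi : r.drop i = r[i] :: r.drop (i + 1) := List.drop_eq_getElem_cons hn
    have hgetDi : r.getD i ' ' = r[i] := List.getD_eq_getElem r ' ' hn
    by_cases hmj : t.length ≤ j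
    · simp only [dif_neg (by omega : ¬ r.length ≤ i), dif_pos hmj]
      refine hfin _ memo ?_ hm
      rw [List.drop_eq_nil_of_le hmj]
      cases s with
      | false =>
        rw [flagged_false, hdropi, compRecA_cons_nil]
        have hiff : (i = r.length - 1 ∧ r.getD i ' ' = '$') ↔ (r[i] :: r.drop (i + 1) = ['$']) := by
          constructor
          · rintro ⟨h1, h2⟩
            have hnil : r.drop (i + 1) = [] := List.drop_eq_nil_of_le (by omega)
            rw [hnil, ← hgetDi, h2]
          · intro hc
            simp only [List.cons.injEq] at hc
            obtain ⟨h1, h2⟩ := hc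
            have := List.drop_eq_nil_iff.mp h2
            exact ⟨by omega, hgetDi.trans h1⟩
        by_cases hQ : r[i] :: r.drop (i + 1) = ['$']
        · rw [if_pos hQ]
          exact decide_eq_true (hiff.mpr hQ)
        · rw [if_neg hQ]
          exact decide_eq_false (fun hP => hQ (hiff.mp hP))
      | true =>
        obtain ⟨hi1, hne⟩ := hg rfl
        have hdropi1 : r.drop (i + 1) = r[i + 1] :: r.drop (i + 2) := List.drop_eq_getElem_cons hi1
        rw [hdropi, hdropi1, flagged_true_cons, compRecA_cons_nil]
        rw [if_neg (by simp)]
        exact decide_eq_false (fun hP => by omega)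
    · push_neg at hmj
      have hdropj : t.drop j = t[j] :: t.drop (j + 1) := List.drop_eq_getElem_cons hmj
      have hgetDj : t.getD j ' ' = t[j] := List.getD_eq_getElem t ' ' hmj
      simp only [dif_neg (by omega : ¬ r.length ≤ i), dif_neg (by omega : ¬ t.length ≤ j)]
      by_cases hbs : r.getD i ' ' = '\\'
      · -- backslash branch; star is false here (GoodSt rules out '\' under star)
        have hs : s = false := by
          cases s with
          | false => rfl
          | true => exact absurd (hgetDi ▸ hbs) (hg rfl).2
        subst hs
        have hbi : r[i] = '\\' := by rw [← hgetDi]; exact hbs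
        simp only [if_pos hbs]
        cases hr1 : r[i + 1]? with
        | none =>
          have h1 : r.drop (i + 1) = [] :=
            List.drop_eq_nil_of_le (by simpa using List.getElem?_eq_none_iff.mp hr1)
          refine hfin false memo ?_ hm
          rw [flagged_false, hdropi, hdropj, h1, compRecA.eq_def]
          rw [dif_neg (List.cons_ne_nil _ _),
            dif_neg (List.cons_ne_nil _ _),
            if_pos (show ([r[i]].headD ' ' = '\\') by simpa using hbi)]
          simp
        | some e =>
          have hi1 : i + 1 < r.length := (List.getElem?_eq_some_iff.mp hr1).1
          have he : r[i + 1] = e := (List.getElem?_eq_some_iff.mp hr1).2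
          have hd1 : r.drop (i + 1) = e :: r.drop (i + 2) := by
            rw [List.drop_eq_getElem_cons hi1, he]
          have hdrop2 : r.drop i = r[i] :: e :: r.drop (i + 2) := by
            rw [hdropi, hd1]
          have hA2 : compRecA (r[i] :: e :: r.drop (i + 2)) (t[j] :: t.drop (j + 1)) =
              (if comp_literal_chars [e] [t[j]] = false then
                 compRecA (r[i] :: e :: r.drop (i + 2)) (t.drop (j + 1))
               else compRecA (r.drop (i + 2)) (t.drop (j + 1))) := by
            conv_lhs => rw [compRecA.eq_def]
            rw [dif_neg (List.cons_ne_nil _ _),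
              dif_neg (List.cons_ne_nil _ _),
              if_pos (show ((r[i] :: e :: r.drop (i + 2)).headD ' ' = '\\') by simpa using hbi)]
            simp only [List.tail_cons, List.headD_cons]
          by_cases heq : e = t.getD j ' '
          · simp only [if_pos heq]
            obtain ⟨h1, h2⟩ := IH ((t.length - (j + 1)) + (r.length - (i + 2))) (by omega)
              r t (i + 2) (j + 1) false memo (le_refl _) (by intro h; cases h) hm
            have hspec : compRecA (flagged false (r.drop (i + 2))) (t.drop (j + 1)) =
                compRecA (flagged false (r.drop i)) (t.drop j) := by
              rw [flagged_false, flagged_false, hdrop2, hdropj, hA2]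
              simp [comp_lit_single, heq.trans hgetDj]
            exact hfin _ _ (h1.trans hspec) h2
          · simp only [if_neg heq]
            obtain ⟨h1, h2⟩ := IH ((t.length - (j + 1)) + (r.length - i)) (by omega)
              r t i (j + 1) false memo (le_refl _) (by intro h; cases h) hm
            have hne : ¬ e = t[j] := fun h => heq (h.trans hgetDj.symm)
            have hspec : compRecA (flagged false (r.drop i)) (t.drop (j + 1)) =
                compRecA (flagged false (r.drop i)) (t.drop j) := by
              conv_rhs => rw [flagged_false, hdrop2, hdropj, hA2]
              rw [flagged_false, hdrop2]
              simp [comp_lit_single, hne]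
            exact hfin _ _ (h1.trans hspec) h2
      · simp only [if_neg hbs]
        have hbineg : ¬ (r[i] = '\\') := fun h => hbs (hgetDi.trans h)
        have hAun : compRecA (flagged false (r.drop i)) (t.drop j) =
            (if comp_str_chars [r[i]] [t[j]] = false then
              (if 1 < (r.drop (i + 1)).length ∧
                   ((r.drop (i + 1)).headD ' ' = '?' ∨ (r.drop (i + 1)).headD ' ' = '*') then
                 compRecA ((r.drop (i + 1)).drop 1) (t[j] :: t.drop (j + 1))
               else if (r.drop (i + 1)).length = 1 ∧
                   ((r.drop (i + 1)).headD ' ' = '?' ∨ (r.drop (i + 1)).headD ' ' = '*') then true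
               else false)
            else if 1 < (r.drop (i + 1)).length then
              (if (r.drop (i + 1)).headD ' ' = '*' then
                 compRecA (r[i] :: r.drop (i + 1)) (t.drop (j + 1)) ||
                   compRecA ((r.drop (i + 1)).drop 1) (t.drop (j + 1))
               else if (r.drop (i + 1)).headD ' ' = '?' then
                 compRecA ((r.drop (i + 1)).drop 1) (t.drop (j + 1))
               else if (r.drop (i + 1)).headD ' ' = '+' then
                 compRecA (r[i] :: '*' :: (r.drop (i + 1)).drop 1) (t.drop (j + 1)) ||
                   compRecA ((r.drop (i + 1)).drop 1) (t.drop (j + 1))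
               else compRecA (r.drop (i + 1)) (t.drop (j + 1)))
            else if (r.drop (i + 1)).length = 1 ∧
                ((r.drop (i + 1)).headD ' ' = '*' ∨ (r.drop (i + 1)).headD ' ' = '+' ∨
                  (r.drop (i + 1)).headD ' ' = '?') then true
            else compRecA (r.drop (i + 1)) (t.drop (j + 1))) := by
          conv_lhs => rw [flagged_false, hdropi, hdropj, compRecA.eq_def]
          rw [dif_neg (List.cons_ne_nil _ _), dif_neg (List.cons_ne_nil _ _),
            if_neg (show ¬ ((r[i] :: r.drop (i + 1)).headD ' ' = '\\') by rw [List.headD_cons]; exact hbineg)]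
          simp only [List.headD_cons, List.tail_cons]
          rfl
        by_cases hhit : (r.getD i ' ' = t.getD j ' ' ∨ r.getD i ' ' = '.')
        · -- matched character
          rw [if_neg (not_not_intro hhit)]
          have hstr_t : comp_str_chars [r[i]] [t[j]] = true := by
            rcases hhit with h | h
            · rw [hgetDi, hgetDj] at h; simp [comp_str_single, h]
            · rw [hgetDi] at h; simp [comp_str_single, h]
          have hstrne : ¬ (comp_str_chars [r[i]] [t[j]] = false) := by rw [hstr_t]; simp
          cases s with
          | false =>
            simp only [show (if (false : Bool) = true then some '*' else r[i + 1]?) = r[i + 1]?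
              from rfl]
            by_cases hlen2 : i + 2 < r.length
            · rw [if_pos hlen2]
              have hq1 : i + 1 < r.length := by omega
              have hd1 : r.drop (i + 1) = r[i + 1] :: r.drop (i + 2) :=
                List.drop_eq_getElem_cons hq1
              have hqv : r[i + 1]? = some r[i + 1] := List.getElem?_eq_getElem hq1
              have hdd : (r.drop (i + 1)).drop 1 = r.drop (i + 2) := by
                rw [hd1, List.drop_succ_cons, List.drop_zero]
              have hlgt : 1 < (r.drop (i + 1)).length := by rw [List.length_drop]; omega
              have hflagF : flagged true (r.drop i) = r[i] :: '*' :: r.drop (i + 2) := by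
                rw [hdropi, hd1, flagged_true_cons]
              by_cases hC1 : r[i + 1] = '*'
              · rw [if_pos (show r[i + 1]? = some '*' by rw [hqv, hC1])]
                have hAor : compRecA (flagged false (r.drop i)) (t.drop j) =
                    (compRecA (flagged false (r.drop i)) (t.drop (j + 1)) ||
                     compRecA (flagged false (r.drop (i + 2))) (t.drop (j + 1))) := by
                  conv_lhs => rw [hAun]
                  rw [if_neg hstrne, if_pos hlgt,
                    if_pos (show (r.drop (i + 1)).headD ' ' = '*' by
                      rw [hd1, List.headD_cons, hC1]), hdd]
                  rw [flagged_false, flagged_false, ← hdropi]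
                obtain ⟨h1, h2⟩ := IH ((t.length - (j + 1)) + (r.length - i)) (by omega)
                  r t i (j + 1) false memo (le_refl _) (fun h => by cases h) hm
                cases hres : (bgo r t i (j + 1) false memo).1 with
                | true =>
                  rw [ite_true_bool]
                  refine hfin true _ ?_ h2
                  rw [hAor, h1.symm.trans hres, Bool.true_or]
                | false =>
                  rw [ite_false_bool]
                  obtain ⟨h1', h2'⟩ := IH ((t.length - (j + 1)) + (r.length - (i + 2)))
                    (by omega) r t (i + 2) (j + 1) false (bgo r t i (j + 1) false memo).2
                    (le_refl _) (fun h => by cases h) h2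
                  refine hfin _ _ (h1'.trans ?_) h2'
                  rw [hAor, h1.symm.trans hres, Bool.false_or]
              · rw [if_neg (show ¬ (r[i + 1]? = some '*') by
                  intro h; rw [hqv] at h; exact hC1 (Option.some.inj h))]
                by_cases hC2 : r[i + 1] = '?'
                · rw [if_pos (show r[i + 1]? = some '?' by rw [hqv, hC2])]
                  obtain ⟨h1, h2⟩ := IH ((t.length - (j + 1)) + (r.length - (i + 2)))
                    (by omega) r t (i + 2) (j + 1) false memo (le_refl _)
                    (fun h => by cases h) hm
                  refine hfin _ _ (h1.trans ?_) h2
                  conv_rhs => rw [hAun]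
                  rw [if_neg hstrne, if_pos hlgt,
                    if_neg (show ¬ ((r.drop (i + 1)).headD ' ' = '*') by
                      rw [hd1, List.headD_cons]; exact hC1),
                    if_pos (show (r.drop (i + 1)).headD ' ' = '?' by
                      rw [hd1, List.headD_cons, hC2]), hdd, flagged_false]
                · rw [if_neg (show ¬ (r[i + 1]? = some '?') by
                    intro h; rw [hqv] at h; exact hC2 (Option.some.inj h))]
                  by_cases hC3 : r[i + 1] = '+'
                  · rw [if_pos (show r[i + 1]? = some '+' by rw [hqv, hC3])]
                    have hAor : compRecA (flagged false (r.drop i)) (t.drop j) =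
                        (compRecA (flagged true (r.drop i)) (t.drop (j + 1)) ||
                         compRecA (flagged false (r.drop (i + 2))) (t.drop (j + 1))) := by
                      conv_lhs => rw [hAun]
                      rw [if_neg hstrne, if_pos hlgt,
                        if_neg (show ¬ ((r.drop (i + 1)).headD ' ' = '*') by
                          rw [hd1, List.headD_cons]; exact hC1),
                        if_neg (show ¬ ((r.drop (i + 1)).headD ' ' = '?') by
                          rw [hd1, List.headD_cons]; exact hC2),
                        if_pos (show (r.drop (i + 1)).headD ' ' = '+' by
                          rw [hd1, List.headD_cons, hC3]), hdd]
                      rw [flagged_false, ← hflagF]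
                    obtain ⟨h1, h2⟩ := IH ((t.length - (j + 1)) + (r.length - i)) (by omega)
                      r t i (j + 1) true memo (le_refl _) (fun _ => ⟨hq1, hbs⟩) hm
                    cases hres : (bgo r t i (j + 1) true memo).1 with
                    | true =>
                      rw [ite_true_bool]
                      refine hfin true _ ?_ h2
                      rw [hAor, h1.symm.trans hres, Bool.true_or]
                    | false =>
                      rw [ite_false_bool]
                      obtain ⟨h1', h2'⟩ := IH ((t.length - (j + 1)) + (r.length - (i + 2)))
                        (by omega) r t (i + 2) (j + 1) false (bgo r t i (j + 1) true memo).2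
                        (le_refl _) (fun h => by cases h) h2
                      refine hfin _ _ (h1'.trans ?_) h2'
                      rw [hAor, h1.symm.trans hres, Bool.false_or]
                  · rw [if_neg (show ¬ (r[i + 1]? = some '+') by
                      intro h; rw [hqv] at h; exact hC3 (Option.some.inj h))]
                    obtain ⟨h1, h2⟩ := IH ((t.length - (j + 1)) + (r.length - (i + 1)))
                      (by omega) r t (i + 1) (j + 1) false memo (le_refl _)
                      (fun h => by cases h) hm
                    refine hfin _ _ (h1.trans ?_) h2
                    conv_rhs => rw [hAun]
                    rw [if_neg hstrne, if_pos hlgt,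
                      if_neg (show ¬ ((r.drop (i + 1)).headD ' ' = '*') by
                        rw [hd1, List.headD_cons]; exact hC1),
                      if_neg (show ¬ ((r.drop (i + 1)).headD ' ' = '?') by
                        rw [hd1, List.headD_cons]; exact hC2),
                      if_neg (show ¬ ((r.drop (i + 1)).headD ' ' = '+') by
                        rw [hd1, List.headD_cons]; exact hC3), flagged_false]
            · rw [if_neg hlen2]
              by_cases hc2 : i + 2 = r.length ∧
                  (r[i + 1]? = some '*' ∨ r[i + 1]? = some '+' ∨ r[i + 1]? = some '?')
              · rw [if_pos hc2]
                have hq1 : i + 1 < r.length := by omega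
                have hd1 : r.drop (i + 1) = r[i + 1] :: r.drop (i + 2) :=
                  List.drop_eq_getElem_cons hq1
                have hqv : r[i + 1]? = some r[i + 1] := List.getElem?_eq_getElem hq1
                refine hfin true memo ?_ hm
                conv_rhs => rw [hAun]
                rw [if_neg hstrne,
                  if_neg (show ¬ (1 < (r.drop (i + 1)).length) by
                    rw [List.length_drop]; omega),
                  if_pos (show (r.drop (i + 1)).length = 1 ∧
                      ((r.drop (i + 1)).headD ' ' = '*' ∨ (r.drop (i + 1)).headD ' ' = '+' ∨
                        (r.drop (i + 1)).headD ' ' = '?') from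
                    ⟨by rw [List.length_drop]; omega, by
                      rcases hc2.2 with h | h | h
                      · left; rw [hd1, List.headD_cons]
                        rw [hqv] at h; exact Option.some.inj h
                      · right; left; rw [hd1, List.headD_cons]
                        rw [hqv] at h; exact Option.some.inj h
                      · right; right; rw [hd1, List.headD_cons]
                        rw [hqv] at h; exact Option.some.inj h⟩)]
              · rw [if_neg hc2]
                obtain ⟨h1, h2⟩ := IH ((t.length - (j + 1)) + (r.length - (i + 1)))
                  (by omega) r t (i + 1) (j + 1) false memo (le_refl _)
                  (fun h => by cases h) hm
                refine hfin _ _ (h1.trans ?_) h2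
                conv_rhs => rw [hAun]
                rw [if_neg hstrne,
                  if_neg (show ¬ (1 < (r.drop (i + 1)).length) by
                    rw [List.length_drop]; omega),
                  if_neg (show ¬ ((r.drop (i + 1)).length = 1 ∧
                      ((r.drop (i + 1)).headD ' ' = '*' ∨ (r.drop (i + 1)).headD ' ' = '+' ∨
                        (r.drop (i + 1)).headD ' ' = '?')) by
                    intro hcon
                    have hl0 : i + 1 < r.length := by
                      have := hcon.1; rw [List.length_drop] at this; omega
                    have hd1 : r.drop (i + 1) = r[i + 1] :: r.drop (i + 2) :=
                      List.drop_eq_getElem_cons hl0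
                    have hqv : r[i + 1]? = some r[i + 1] := List.getElem?_eq_getElem hl0
                    apply hc2
                    refine ⟨by have := hcon.1; rw [List.length_drop] at this; omega, ?_⟩
                    rcases hcon.2 with h | h | h
                    · left; rw [hqv]; rw [hd1, List.headD_cons] at h; rw [h]
                    · right; left; rw [hqv]; rw [hd1, List.headD_cons] at h; rw [h]
                    · right; right; rw [hqv]; rw [hd1, List.headD_cons] at h; rw [h]),
                  flagged_false]
          | true =>
            simp only [eq_self_iff_true, if_true, or_true, true_or, and_true]
            obtain ⟨hi1, _⟩ := hg rfl
            have hd1 : r.drop (i + 1) = r[i + 1] :: r.drop (i + 2) :=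
              List.drop_eq_getElem_cons hi1
            have hflagT : flagged true (r.drop i) = r[i] :: '*' :: r.drop (i + 2) := by
              rw [hdropi, hd1, flagged_true_cons]
            have hAunT : compRecA (flagged true (r.drop i)) (t.drop j) =
                (if comp_str_chars [r[i]] [t[j]] = false then
                  (if 1 < ('*' :: r.drop (i + 2)).length ∧ (('*' : Char) = '?' ∨ ('*' : Char) = '*') then
                     compRecA (r.drop (i + 2)) (t[j] :: t.drop (j + 1))
                   else if ('*' :: r.drop (i + 2)).length = 1 ∧ (('*' : Char) = '?' ∨ ('*' : Char) = '*') then true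
                   else false)
                else if 1 < ('*' :: r.drop (i + 2)).length then
                  (compRecA (r[i] :: '*' :: r.drop (i + 2)) (t.drop (j + 1)) ||
                    compRecA (r.drop (i + 2)) (t.drop (j + 1)))
                else if ('*' :: r.drop (i + 2)).length = 1 ∧
                    (('*' : Char) = '*' ∨ ('*' : Char) = '+' ∨ ('*' : Char) = '?') then true
                else compRecA ('*' :: r.drop (i + 2)) (t.drop (j + 1))) := by
              conv_lhs => rw [hflagT, hdropj, compRecA.eq_def]
              rw [dif_neg (List.cons_ne_nil _ _), dif_neg (List.cons_ne_nil _ _),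
                if_neg (show ¬ ((r[i] :: '*' :: r.drop (i + 2)).headD ' ' = '\\') by
                  simpa using hbineg)]
              simp only [List.headD_cons, List.tail_cons, List.drop_succ_cons, List.drop_zero]
              rw [if_pos trivial]
            by_cases hlen2 : i + 2 < r.length
            · rw [if_pos hlen2]
              have hAor : compRecA (flagged true (r.drop i)) (t.drop j) =
                  (compRecA (flagged true (r.drop i)) (t.drop (j + 1)) ||
                   compRecA (flagged false (r.drop (i + 2))) (t.drop (j + 1))) := by
                conv_lhs => rw [hAunT]
                rw [if_neg hstrne,
                  if_pos (show 1 < ('*' :: r.drop (i + 2)).length by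
                    simp [List.length_drop]; omega)]
                rw [flagged_false, ← hflagT]
              obtain ⟨h1, h2⟩ := IH ((t.length - (j + 1)) + (r.length - i)) (by omega)
                r t i (j + 1) true memo (le_refl _) hg hm
              cases hres : (bgo r t i (j + 1) true memo).1 with
              | true =>
                rw [ite_true_bool]
                refine hfin true _ ?_ h2
                rw [hAor, h1.symm.trans hres, Bool.true_or]
              | false =>
                rw [ite_false_bool]
                obtain ⟨h1', h2'⟩ := IH ((t.length - (j + 1)) + (r.length - (i + 2)))
                  (by omega) r t (i + 2) (j + 1) false (bgo r t i (j + 1) true memo).2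
                  (le_refl _) (fun h => by cases h) h2
                refine hfin _ _ (h1'.trans ?_) h2'
                rw [hAor, h1.symm.trans hres, Bool.false_or]
            · rw [if_neg hlen2, if_pos (show i + 2 = r.length by omega)]
              refine hfin true memo ?_ hm
              conv_rhs => rw [hAunT]
              rw [if_neg hstrne,
                if_neg (show ¬ (1 < ('*' :: r.drop (i + 2)).length) by
                  simp [List.length_drop]; omega),
                if_pos (show ('*' :: r.drop (i + 2)).length = 1 ∧
                    (('*' : Char) = '*' ∨ ('*' : Char) = '+' ∨ ('*' : Char) = '?') from
                  ⟨by simp [List.length_drop]; omega, Or.inl rfl⟩)]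
        · -- mismatched character
          rw [if_pos hhit]
          have hstrf : comp_str_chars [r[i]] [t[j]] = false := by
            rw [comp_str_single]
            simp only [Bool.or_eq_false_iff, decide_eq_false_iff_not]
            exact ⟨fun h => hhit (Or.inl (by rw [hgetDi, hgetDj, h])),
                   fun h => hhit (Or.inr (by rw [hgetDi, h]))⟩
          cases s with
          | false =>
            simp only [show (if (false : Bool) = true then some '*' else r[i + 1]?) = r[i + 1]?
              from rfl]
            by_cases hc1 : i + 2 < r.length ∧ (r[i + 1]? = some '?' ∨ r[i + 1]? = some '*')
            · rw [dif_pos hc1]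
              have hq1 : i + 1 < r.length := by omega
              have hd1 : r.drop (i + 1) = r[i + 1] :: r.drop (i + 2) :=
                List.drop_eq_getElem_cons hq1
              have hqv : r[i + 1]? = some r[i + 1] := List.getElem?_eq_getElem hq1
              have hdd : (r.drop (i + 1)).drop 1 = r.drop (i + 2) := by
                rw [hd1, List.drop_succ_cons, List.drop_zero]
              obtain ⟨h1, h2⟩ := IH ((t.length - j) + (r.length - (i + 2))) (by omega)
                r t (i + 2) j false memo (le_refl _) (fun h => by cases h) hm
              refine hfin _ _ (h1.trans ?_) h2
              conv_rhs => rw [hAun]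
              rw [if_pos hstrf,
                if_pos (show 1 < (r.drop (i + 1)).length ∧
                    ((r.drop (i + 1)).headD ' ' = '?' ∨ (r.drop (i + 1)).headD ' ' = '*') from
                  ⟨by rw [List.length_drop]; omega, by
                    rcases hc1.2 with h | h
                    · left; rw [hd1, List.headD_cons]; rw [hqv] at h; exact Option.some.inj h
                    · right; rw [hd1, List.headD_cons]; rw [hqv] at h
                      exact Option.some.inj h⟩), hdd, flagged_false, ← hdropj]
            · rw [dif_neg hc1]
              by_cases hc2 : i + 2 = r.length ∧ (r[i + 1]? = some '?' ∨ r[i + 1]? = some '*')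
              · rw [if_pos hc2]
                have hq1 : i + 1 < r.length := by omega
                have hd1 : r.drop (i + 1) = r[i + 1] :: r.drop (i + 2) :=
                  List.drop_eq_getElem_cons hq1
                have hqv : r[i + 1]? = some r[i + 1] := List.getElem?_eq_getElem hq1
                refine hfin true memo ?_ hm
                conv_rhs => rw [hAun]
                rw [if_pos hstrf,
                  if_neg (show ¬ (1 < (r.drop (i + 1)).length ∧
                      ((r.drop (i + 1)).headD ' ' = '?' ∨ (r.drop (i + 1)).headD ' ' = '*')) by
                    intro hcon
                    have := hcon.1; rw [List.length_drop] at this; omega),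
                  if_pos (show (r.drop (i + 1)).length = 1 ∧
                      ((r.drop (i + 1)).headD ' ' = '?' ∨ (r.drop (i + 1)).headD ' ' = '*') from
                    ⟨by rw [List.length_drop]; omega, by
                      rcases hc2.2 with h | h
                      · left; rw [hd1, List.headD_cons]; rw [hqv] at h; exact Option.some.inj h
                      · right; rw [hd1, List.headD_cons]; rw [hqv] at h
                        exact Option.some.inj h⟩)]
              · rw [if_neg hc2]
                refine hfin false memo ?_ hm
                conv_rhs => rw [hAun]
                rw [if_pos hstrf,
                  if_neg (show ¬ (1 < (r.drop (i + 1)).length ∧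
                      ((r.drop (i + 1)).headD ' ' = '?' ∨ (r.drop (i + 1)).headD ' ' = '*')) by
                    intro hcon
                    have hl0 : i + 1 < r.length := by
                      have := hcon.1; rw [List.length_drop] at this; omega
                    have hd1 : r.drop (i + 1) = r[i + 1] :: r.drop (i + 2) :=
                      List.drop_eq_getElem_cons hl0
                    have hqv : r[i + 1]? = some r[i + 1] := List.getElem?_eq_getElem hl0
                    apply hc1
                    refine ⟨by have := hcon.1; rw [List.length_drop] at this; omega, ?_⟩
                    rcases hcon.2 with h | h
                    · left; rw [hqv]; rw [hd1, List.headD_cons] at h; rw [h]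
                    · right; rw [hqv]; rw [hd1, List.headD_cons] at h; rw [h]),
                  if_neg (show ¬ ((r.drop (i + 1)).length = 1 ∧
                      ((r.drop (i + 1)).headD ' ' = '?' ∨ (r.drop (i + 1)).headD ' ' = '*')) by
                    intro hcon
                    have hl0 : i + 1 < r.length := by
                      have := hcon.1; rw [List.length_drop] at this; omega
                    have hd1 : r.drop (i + 1) = r[i + 1] :: r.drop (i + 2) :=
                      List.drop_eq_getElem_cons hl0
                    have hqv : r[i + 1]? = some r[i + 1] := List.getElem?_eq_getElem hl0
                    apply hc2
                    refine ⟨by have := hcon.1; rw [List.length_drop] at this; omega, ?_⟩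
                    rcases hcon.2 with h | h
                    · left; rw [hqv]; rw [hd1, List.headD_cons] at h; rw [h]
                    · right; rw [hqv]; rw [hd1, List.headD_cons] at h; rw [h])]
          | true =>
            simp only [eq_self_iff_true, if_true, or_true, true_or, and_true]
            obtain ⟨hi1, _⟩ := hg rfl
            have hd1 : r.drop (i + 1) = r[i + 1] :: r.drop (i + 2) :=
              List.drop_eq_getElem_cons hi1
            have hflagT : flagged true (r.drop i) = r[i] :: '*' :: r.drop (i + 2) := by
              rw [hdropi, hd1, flagged_true_cons]
            have hAunT : compRecA (flagged true (r.drop i)) (t.drop j) =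
                (if comp_str_chars [r[i]] [t[j]] = false then
                  (if 1 < ('*' :: r.drop (i + 2)).length ∧ (('*' : Char) = '?' ∨ ('*' : Char) = '*') then
                     compRecA (r.drop (i + 2)) (t[j] :: t.drop (j + 1))
                   else if ('*' :: r.drop (i + 2)).length = 1 ∧ (('*' : Char) = '?' ∨ ('*' : Char) = '*') then true
                   else false)
                else if 1 < ('*' :: r.drop (i + 2)).length then
                  (compRecA (r[i] :: '*' :: r.drop (i + 2)) (t.drop (j + 1)) ||
                    compRecA (r.drop (i + 2)) (t.drop (j + 1)))
                else if ('*' :: r.drop (i + 2)).length = 1 ∧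
                    (('*' : Char) = '*' ∨ ('*' : Char) = '+' ∨ ('*' : Char) = '?') then true
                else compRecA ('*' :: r.drop (i + 2)) (t.drop (j + 1))) := by
              conv_lhs => rw [hflagT, hdropj, compRecA.eq_def]
              rw [dif_neg (List.cons_ne_nil _ _), dif_neg (List.cons_ne_nil _ _),
                if_neg (show ¬ ((r[i] :: '*' :: r.drop (i + 2)).headD ' ' = '\\') by
                  simpa using hbineg)]
              simp only [List.headD_cons, List.tail_cons, List.drop_succ_cons, List.drop_zero]
              rw [if_pos trivial]
            by_cases hlen2 : i + 2 < r.length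
            · rw [dif_pos hlen2]
              obtain ⟨h1, h2⟩ := IH ((t.length - j) + (r.length - (i + 2))) (by omega)
                r t (i + 2) j false memo (le_refl _) (fun h => by cases h) hm
              refine hfin _ _ (h1.trans ?_) h2
              conv_rhs => rw [hAunT]
              rw [if_pos hstrf,
                if_pos (show 1 < ('*' :: r.drop (i + 2)).length ∧
                    (('*' : Char) = '?' ∨ ('*' : Char) = '*') from
                  ⟨by simp [List.length_drop]; omega, Or.inr rfl⟩),
                flagged_false, ← hdropj]
            · rw [dif_neg hlen2, if_pos (show i + 2 = r.length by omega)]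
              refine hfin true memo ?_ hm
              conv_rhs => rw [hAunT]
              rw [if_pos hstrf,
                if_neg (show ¬ (1 < ('*' :: r.drop (i + 2)).length ∧
                    (('*' : Char) = '?' ∨ ('*' : Char) = '*')) by
                  intro hcon
                  have := hcon.1; simp [List.length_drop] at this; omega),
                if_pos (show ('*' :: r.drop (i + 2)).length = 1 ∧
                    (('*' : Char) = '?' ∨ ('*' : Char) = '*') from
                  ⟨by simp [List.length_drop]; omega, Or.inr rfl⟩)]

theorem searchB_eq (r t : List Char) (fuel : Nat) : ∀ (k : Nat)
    (memo : PySem.Dict (Nat × Nat × Bool) Bool), t.length - k ≤ fuel → MemoInv r t memo →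
    searchB r t k memo = searchA r t k := by
  induction fuel with
  | zero =>
    intro k memo hf _
    rw [searchB.eq_def, searchA.eq_def]
    rw [if_neg (by omega), if_neg (by omega)]
  | succ fuel ih =>
    intro k memo hf hmv
    rw [searchB.eq_def, searchA.eq_def]
    by_cases hk : k < t.length
    · rw [if_pos hk, if_pos hk]
      obtain ⟨h1, h2⟩ := bgo_ok ((t.length - k) + (r.length - 0)) r t 0 k false memo (le_refl _)
        (by intro h; cases h) hmv
      rw [h1, flagged_false, List.drop_zero]
      by_cases hc : compRecA r (t.drop k) = true
      · rw [if_pos hc, if_pos hc]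
      · rw [if_neg hc, if_neg hc]
        exact ih (k + 1) _ (by omega) h2
    · rw [if_neg hk, if_neg hk]

-- ===== VERDICT (by name: the statement is the Claim_ definition above) =====
theorem comp_diff_spec : Claim_equal_comp_diff := by
  unfold Claim_equal_comp_diff
  intro re txt _ _
  unfold Spec_comp_diff comp_diff comp_diff_alt
  by_cases h1 : re.toList = []
  · rw [if_pos h1, if_pos h1]
  · rw [if_neg h1, if_neg h1]
    by_cases h2 : re.toList.headD ' ' = '^'
    · rw [if_pos h2, if_pos h2]
      obtain ⟨h3, _⟩ := bgo_ok ((txt.toList.length - 0) + (re.toList.length - 1))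
        re.toList txt.toList 1 0 false PySem.Dict.empty (le_refl _)
        (by intro h; cases h) (MemoInv_empty _ _)
      rw [h3, flagged_false, List.drop_zero]
    · rw [if_neg h2, if_neg h2]
      exact (searchB_eq re.toList txt.toList txt.toList.length 0 PySem.Dict.empty
        (by omega) (MemoInv_empty _ _)).symm
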